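-- pv_equiv track=rewrite | github.com/kotechile/trend_analisys | trend-analysis-platform/backend/src/services/ahrefs_content_generator.py | _determine_content_angle
-- ===== SOURCE A (Python) =====
-- from typing import List, Dict, Any, Optional
--
-- def _determine_content_angle(keywords: List[Dict[str, Any]]) -> str:
--     """Determine content angle based on keyword data"""
--     if not keywords:
--         return 'informational'
--
--     intents = [intent for kw in keywords for intent in kw.get('intents', [])]
--
--     if any('commercial' in intent.lower() for intent in intents):
--         return 'commercial_review'
--     elif any('transactional' in intent.lower() for intent in intents):
--         return 'buying_guide'
--     else:
--         return 'educational_tutorial'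
-- ===== SOURCE B (Python) =====
-- from typing import List, Dict, Any
--
-- _ANGLES = ('commercial_review', 'buying_guide', 'educational_tutorial')
--
-- def _rank(intent: str) -> int:
--     s = intent.lower()
--     if 'commercial' in s:
--         return 0
--     if 'transactional' in s:
--         return 1
--     return 2
--
-- def _determine_content_angle(keywords: List[Dict[str, Any]]) -> str:
--     """Single pass: keep the best (lowest) intent rank seen, then index a table."""
--     if not keywords:
--         return 'informational'
--     best = 2
--     for kw in keywords:
--         for intent in kw.get('intents', []):
--             r = _rank(intent)
--             if r < best:
--                 best = r
--     return _ANGLES[best]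
-- ===== Notes on version B (the rewrite author's own statement) =====
-- stated objective: alternative
-- what changed: Replaces the flatten-all-intents list plus two separate any() scans with one pass over keywords maintaining the minimum intent rank (0=commercial, 1=transactional, 2=other) and a final table lookup.
import Mathlib
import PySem

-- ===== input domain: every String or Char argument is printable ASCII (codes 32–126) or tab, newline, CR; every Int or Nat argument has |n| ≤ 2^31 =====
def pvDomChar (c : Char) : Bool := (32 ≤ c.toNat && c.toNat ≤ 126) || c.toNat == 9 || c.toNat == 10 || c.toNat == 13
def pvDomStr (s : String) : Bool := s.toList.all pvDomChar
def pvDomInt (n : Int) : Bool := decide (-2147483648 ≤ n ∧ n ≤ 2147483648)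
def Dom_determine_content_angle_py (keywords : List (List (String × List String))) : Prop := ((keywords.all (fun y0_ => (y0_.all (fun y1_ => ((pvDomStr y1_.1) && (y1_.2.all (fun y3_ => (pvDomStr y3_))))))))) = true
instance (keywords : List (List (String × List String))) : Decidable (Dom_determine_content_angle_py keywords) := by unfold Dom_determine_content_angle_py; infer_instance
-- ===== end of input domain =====

-- B replaces A's flatten-plus-two-any-scans with one pass keeping the minimum intent rank; alternative decomposition, same cost.


-- ===== PORT A =====
-- kw.get('intents', []) on an association list: first match, default []
def pvGetIntents (kw : List (String × List String)) : List String :=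
  match kw.find? (fun p => p.1 == "intents") with
  | some p => p.2
  | none => []

def determine_content_angle_py (keywords : List (List (String × List String))) : String :=
  if keywords = [] then "informational"
  else
    let intents := keywords.flatMap (fun kw => pvGetIntents kw)
    if intents.any (fun i => PySem.Str.isIn "commercial" (PySem.Str.lower i)) then "commercial_review"
    else if intents.any (fun i => PySem.Str.isIn "transactional" (PySem.Str.lower i)) then "buying_guide"
    else "educational_tutorial"

-- ===== PORT B =====
def pvRank (intent : String) : Nat :=
  let s := PySem.Str.lower intent
  if PySem.Str.isIn "commercial" s then 0
  else if PySem.Str.isIn "transactional" s then 1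
  else 2

def pvAngles : List String := ["commercial_review", "buying_guide", "educational_tutorial"]

def determine_content_angle_py_alt (keywords : List (List (String × List String))) : String :=
  if keywords = [] then "informational"
  else
    let best := keywords.foldl
      (fun b kw => (pvGetIntents kw).foldl (fun b i => let r := pvRank i; if r < b then r else b) b) 2
    pvAngles.getD best ""

-- ===== PRECONDITION & SPEC =====
def Spec_determine_content_angle_py (keywords : List (List (String × List String))) (out : String) : Prop := out = determine_content_angle_py_alt keywords
instance (keywords : List (List (String × List String))) (out : String) : Decidable (Spec_determine_content_angle_py keywords out) := by unfold Spec_determine_content_angle_py; infer_instance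

-- ===== CLAIM (what is proved, stated in full; the proofs are below) =====
def Claim_equal_determine_content_angle_py : Prop := ∀ (keywords : List (List (String × List String))), Dom_determine_content_angle_py keywords → Spec_determine_content_angle_py keywords (determine_content_angle_py keywords)

-- ===== LEMMAS AND PROOFS =====

-- the inner step of B's loop is 'min'
lemma pvStep_eq_min (b : Nat) (i : String) :
    (let r := pvRank i; if r < b then r else b) = min b (pvRank i) := by
  show (if pvRank i < b then pvRank i else b) = min b (pvRank i)
  by_cases h : pvRank i < b
  · rw [if_pos h, Nat.min_def, if_neg (by omega)]
  · rw [if_neg h, Nat.min_def, if_pos (by omega)]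

-- B's nested fold equals a fold over the flattened intent list
lemma pv_fold_flat (keywords : List (List (String × List String))) (b : Nat) :
    keywords.foldl
      (fun b kw => (pvGetIntents kw).foldl (fun b i => let r := pvRank i; if r < b then r else b) b) b
    = (keywords.flatMap (fun kw => pvGetIntents kw)).foldl
        (fun b i => let r := pvRank i; if r < b then r else b) b := by
  induction keywords generalizing b with
  | nil => rfl
  | cons kw rest ih => simp [List.flatMap_cons, List.foldl_append, ih]

-- characterisation of the min-rank fold by the two 'any' scans
lemma pv_fold_char (L : List String) (b : Nat) (hb : b ≤ 2) :
    L.foldl (fun b i => let r := pvRank i; if r < b then r else b) b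
    = min b (if L.any (fun i => PySem.Str.isIn "commercial" (PySem.Str.lower i)) then 0
             else if L.any (fun i => PySem.Str.isIn "transactional" (PySem.Str.lower i)) then 1
             else 2) := by
  induction L generalizing b with
  | nil => simp [Nat.min_def]; omega
  | cons x xs ih =>
    rw [List.foldl_cons, pvStep_eq_min,
        ih (min b (pvRank x)) (le_trans (Nat.min_le_left _ _) hb)]
    by_cases hcb : PySem.Chars.isIn ['c','o','m','m','e','r','c','i','a','l'] (PySem.Chars.lower x.toList) = true <;>
      by_cases htb : PySem.Chars.isIn ['t','r','a','n','s','a','c','t','i','o','n','a','l'] (PySem.Chars.lower x.toList) = true <;>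
        by_cases hca : ∃ i ∈ xs, PySem.Chars.isIn ['c','o','m','m','e','r','c','i','a','l'] (PySem.Chars.lower i.toList) = true <;>
          by_cases hta : ∃ i ∈ xs, PySem.Chars.isIn ['t','r','a','n','s','a','c','t','i','o','n','a','l'] (PySem.Chars.lower i.toList) = true <;>
            simp [pvRank, hcb, htb, hca, hta, Nat.min_def] <;> split_ifs <;> omega

-- ===== VERDICT (by name: the statement is the Claim_ definition above) =====
theorem determine_content_angle_py_spec : Claim_equal_determine_content_angle_py := by
  intro keywords _
  unfold Spec_determine_content_angle_py determine_content_angle_py determine_content_angle_py_alt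
  by_cases hk : keywords = []
  · simp [hk]
  · simp only [hk, if_false]
    rw [pv_fold_flat, pv_fold_char _ _ (by omega)]
    split_ifs <;> simp [pvAngles]
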